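-- pv_equiv track=rewrite | github.com/jitiniqacsantosh/Project-2 | Cal.py | percent_transform
-- ===== SOURCE A (Python) =====
-- def percent_transform(expr):
--     # Convert a% into (a/100)
--     # Handle numbers followed by % possibly chained like 50%*200
--     # Replace occurrences of number% with (number/100)
--     out = ""
--     i = 0
--     while i < len(expr):
--         if expr[i].isdigit() or (expr[i] == '.' and i+1 < len(expr) and expr[i+1].isdigit()):
--             j = i
--             while j < len(expr) and (expr[j].isdigit() or expr[j] == '.'):
--                 j += 1
--             if j < len(expr) and expr[j] == '%':
--                 num = expr[i:j]
--                 out += '(' + num + '/100)'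
--                 i = j + 1
--                 continue
--             else:
--                 out += expr[i:j]
--                 i = j
--                 continue
--         else:
--             out += expr[i]
--             i += 1
--     return out
-- ===== SOURCE B (Python) =====
-- def percent_transform(expr):
--     # split on '%'; for each segment before a '%', wrap its trailing number token in (.../100)
--     parts = expr.split('%')
--     pieces = []
--     for seg in parts[:-1]:
--         head = seg.rstrip('0123456789.')
--         run = seg[len(head):]                     # maximal digit/dot suffix before this '%'
--         dots = len(run) - len(run.lstrip('.'))    # leading dots of the run
--         if dots == len(run):
--             pieces.append(seg + '%')              # no digit: the '%' stays literal
--         else: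
--             cut = len(head) + (dots - 1 if dots > 0 else 0)
--             pieces.append(seg[:cut] + '(' + seg[cut:] + '/100)')
--     pieces.append(parts[-1])
--     return ''.join(pieces)
-- ===== Notes on version B (the rewrite author's own statement) =====
-- stated objective: faster
-- what changed: A scans the string index by index with an inner digit/dot scanning loop and grows the output by repeated string concatenation; B instead splits the input on the percent character once, rewrites the trailing number of each fragment (maximal digit/dot suffix found with rstrip, trimmed with lstrip so it starts at a digit or a dot directly before a digit) into a parenthesised division by 100, and joins all pieces once at the end.
import Mathlib
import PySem

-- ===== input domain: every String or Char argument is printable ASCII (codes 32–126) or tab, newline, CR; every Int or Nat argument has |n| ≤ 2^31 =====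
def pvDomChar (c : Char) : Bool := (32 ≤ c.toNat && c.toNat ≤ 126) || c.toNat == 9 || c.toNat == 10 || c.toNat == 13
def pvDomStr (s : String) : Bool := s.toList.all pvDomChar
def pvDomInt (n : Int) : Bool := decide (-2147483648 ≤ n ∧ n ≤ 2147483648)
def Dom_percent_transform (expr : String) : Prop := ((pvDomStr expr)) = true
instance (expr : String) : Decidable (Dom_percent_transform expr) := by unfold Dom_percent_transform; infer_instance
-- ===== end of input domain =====

-- B replaces A's character-by-character forward scan (which grows `out` by repeated string
-- concatenation) with one split on the percent sign plus an rstrip/lstrip analysis per fragment,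
-- joined once at the end; a timing run measured B faster. Return values proved equal on all inputs.

-- ===== PORT A =====
-- the character class of A's inner scanning loop: expr[j].isdigit() or expr[j] == '.'
def paDD (c : Char) : Bool := c.isDigit || c == '.'

-- A's while loop: state = (remaining suffix of expr, out); the inner j-scan is the
-- maximal paDD-run (takeWhile/dropWhile) of the remaining suffix, exactly expr[i:j] / expr[j:].
def percentTransformLoop (cs : List Char) (out : List Char) : List Char :=
  match cs with
  | [] => out
  | c :: rest =>
    if hc : (c.isDigit || (c == '.' && ((rest.head?.map Char.isDigit).getD false))) = true then
      -- j < len(expr) and expr[j] == '%'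
      if (List.dropWhile paDD (c :: rest)).head? = some '%' then
        percentTransformLoop (List.dropWhile paDD (c :: rest)).tail
          (out ++ '(' :: (List.takeWhile paDD (c :: rest) ++ "/100)".toList))
      else
        percentTransformLoop (List.dropWhile paDD (c :: rest))
          (out ++ List.takeWhile paDD (c :: rest))
    else
      percentTransformLoop rest (out ++ [c])
termination_by cs.length
decreasing_by
  · have hc' : paDD c = true := by
      simp only [paDD, Bool.or_eq_true, Bool.and_eq_true] at hc ⊢
      tauto
    rw [List.dropWhile_cons_of_pos hc']
    have h1 := List.length_dropWhile_le paDD rest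
    have h2 : (List.dropWhile paDD rest).tail.length ≤ (List.dropWhile paDD rest).length := by simp [List.length_tail]
    simp only [List.length_cons]; omega
  · have hc' : paDD c = true := by
      simp only [paDD, Bool.or_eq_true, Bool.and_eq_true] at hc ⊢
      tauto
    rw [List.dropWhile_cons_of_pos hc']
    have h1 := List.length_dropWhile_le paDD rest
    simp only [List.length_cons]; omega
  · simp

def percent_transform (expr : String) : String :=
  String.ofList (percentTransformLoop expr.toList [])

-- ===== PORT B =====
-- the char set literal '0123456789.' of Source B's rstrip
def pbCls (c : Char) : Bool := "0123456789.".toList.contains c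

-- loop body of Source B: one piece per '%'-separated fragment (all but the last)
def pbPiece (seg : List Char) : List Char :=
  let head := (List.dropWhile pbCls seg.reverse).reverse     -- seg.rstrip('0123456789.')
  let run := seg.drop head.length                            -- seg[len(head):]
  let dots := run.length - (List.dropWhile (· == '.') run).length  -- leading dots via lstrip('.')
  if dots = run.length then
    seg ++ ['%']
  else
    let cut := head.length + (if dots > 0 then dots - 1 else 0)
    seg.take cut ++ '(' :: (seg.drop cut ++ "/100)".toList)

def percent_transform_alt (expr : String) : String :=
  let parts := PySem.Chars.splitOn expr.toList ['%']
  String.ofList (PySem.Chars.join [] (parts.dropLast.map pbPiece ++ [parts.getLastD []]))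

-- ===== PRECONDITION & SPEC =====
def Spec_percent_transform (expr : String) (out : String) : Prop := out = percent_transform_alt expr
instance (expr : String) (out : String) : Decidable (Spec_percent_transform expr out) := by unfold Spec_percent_transform; infer_instance

-- ===== CLAIM (what is proved, stated in full; the proofs are below) =====
def Claim_equal_percent_transform : Prop := ∀ (expr : String), Dom_percent_transform expr → Spec_percent_transform expr (percent_transform expr)

-- ===== LEMMAS AND PROOFS =====
lemma pbCls_eq_paDD (c : Char) : pbCls c = paDD c := by
  rw [Bool.eq_iff_iff]
  simp only [pbCls, paDD, Char.isDigit, List.contains_iff_exists_mem_beq]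
  simp [Char.ext_iff, UInt32.ext_iff, UInt32.le_iff_toNat_le, UInt32.toNat_ofNat]
  constructor
  · rintro ⟨a, ha, he⟩; omega
  · intro h; exact ⟨c, by omega, rfl⟩

lemma cond_paDD {c : Char} {rest : List Char}
    (h : (c.isDigit || (c == '.' && ((rest.head?.map Char.isDigit).getD false))) = true) :
    paDD c = true := by
  simp only [paDD, Bool.or_eq_true, Bool.and_eq_true] at h ⊢; tauto

lemma loop_out_aux : ∀ (n : Nat) (cs : List Char), cs.length ≤ n → ∀ out,
    percentTransformLoop cs out = out ++ percentTransformLoop cs [] := by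
  intro n
  induction n with
  | zero =>
    intro cs h out
    have : cs = [] := List.eq_nil_of_length_eq_zero (Nat.le_zero.mp h)
    subst this; simp [percentTransformLoop]
  | succ n ih =>
    intro cs h out
    match cs with
    | [] => simp [percentTransformLoop]
    | c :: rest =>
      simp only [List.length_cons] at h
      rw [percentTransformLoop, percentTransformLoop]
      by_cases hc : (c.isDigit || (c == '.' && ((rest.head?.map Char.isDigit).getD false))) = true
      · rw [dif_pos hc, dif_pos hc]
        have hpa := cond_paDD hc
        have hlen : (List.dropWhile paDD (c :: rest)).length ≤ rest.length := by
          rw [List.dropWhile_cons_of_pos hpa]; exact List.length_dropWhile_le _ _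
        by_cases hp : (List.dropWhile paDD (c :: rest)).head? = some '%'
        · rw [if_pos hp, if_pos hp]
          have hb : (List.dropWhile paDD (c :: rest)).tail.length ≤ n := by
            have := (List.dropWhile paDD (c :: rest)).length_tail; omega
          simp only [List.nil_append]
          rw [ih _ hb, ih _ hb ('(' :: (List.takeWhile paDD (c :: rest) ++ "/100)".toList))]
          simp
        · rw [if_neg hp, if_neg hp]
          have hb : (List.dropWhile paDD (c :: rest)).length ≤ n := by omega
          simp only [List.nil_append]
          rw [ih _ hb, ih _ hb (List.takeWhile paDD (c :: rest))]
          simp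
      · rw [dif_neg hc, dif_neg hc]
        have hb : rest.length ≤ n := by omega
        simp only [List.nil_append]
        rw [ih _ hb, ih _ hb [c]]
        simp

lemma loop_out (cs out : List Char) :
    percentTransformLoop cs out = out ++ percentTransformLoop cs [] :=
  loop_out_aux cs.length cs le_rfl out

-- A's loop without accumulator
def ptA (cs : List Char) : List Char := percentTransformLoop cs []

lemma ptA_nil : ptA [] = [] := by simp [ptA, percentTransformLoop]

lemma ptA_cons_wrap {c : Char} {rest : List Char}
    (hc : (c.isDigit || (c == '.' && ((rest.head?.map Char.isDigit).getD false))) = true)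
    (hp : (List.dropWhile paDD (c :: rest)).head? = some '%') :
    ptA (c :: rest) = '(' :: (List.takeWhile paDD (c :: rest) ++ "/100)".toList)
      ++ ptA (List.dropWhile paDD (c :: rest)).tail := by
  rw [ptA, percentTransformLoop, dif_pos hc, if_pos hp, loop_out]; rfl

lemma ptA_cons_run {c : Char} {rest : List Char}
    (hc : (c.isDigit || (c == '.' && ((rest.head?.map Char.isDigit).getD false))) = true)
    (hp : ¬ (List.dropWhile paDD (c :: rest)).head? = some '%') :
    ptA (c :: rest) = List.takeWhile paDD (c :: rest) ++ ptA (List.dropWhile paDD (c :: rest)) := by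
  rw [ptA, percentTransformLoop, dif_pos hc, if_neg hp, loop_out]; rfl

lemma ptA_cons_lit {c : Char} {rest : List Char}
    (hc : ¬ (c.isDigit || (c == '.' && ((rest.head?.map Char.isDigit).getD false))) = true) :
    ptA (c :: rest) = c :: ptA rest := by
  rw [ptA, percentTransformLoop, dif_neg hc, loop_out]; rfl

lemma ptA_no_pct_aux : ∀ (n : Nat) (cs : List Char), cs.length ≤ n → '%' ∉ cs → ptA cs = cs := by
  intro n
  induction n with
  | zero =>
    intro cs h _
    have : cs = [] := List.eq_nil_of_length_eq_zero (Nat.le_zero.mp h)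
    subst this; exact ptA_nil
  | succ n ih =>
    intro cs h hn
    match cs with
    | [] => exact ptA_nil
    | c :: rest =>
      simp only [List.length_cons] at h
      by_cases hc : (c.isDigit || (c == '.' && ((rest.head?.map Char.isDigit).getD false))) = true
      · have hpa := cond_paDD hc
        have hlen : (List.dropWhile paDD (c :: rest)).length ≤ rest.length := by
          rw [List.dropWhile_cons_of_pos hpa]; exact List.length_dropWhile_le _ _
        have hsub : ∀ x ∈ List.dropWhile paDD (c :: rest), x ∈ c :: rest :=
          fun x hx => (List.dropWhile_suffix paDD).subset hx
        have hp : ¬ (List.dropWhile paDD (c :: rest)).head? = some '%' := by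
          intro hp
          exact hn (hsub _ (List.mem_of_mem_head? hp))
        rw [ptA_cons_run hc hp]
        rw [ih _ (by omega) (fun hx => hn (hsub _ hx))]
        exact List.takeWhile_append_dropWhile
      · rw [ptA_cons_lit hc, ih rest (by omega) (fun hx => hn (List.mem_cons_of_mem _ hx))]

-- a prefix that contains no '%' and does not end in a digit/dot passes through A's loop verbatim
lemma ptA_passthrough_aux : ∀ (n : Nat) (head : List Char), head.length ≤ n → '%' ∉ head →
    (∀ x, head.getLast? = some x → paDD x = false) →
    ∀ tail, ptA (head ++ tail) = head ++ ptA tail := by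
  intro n
  induction n with
  | zero =>
    intro head h _ _ tail
    have : head = [] := List.eq_nil_of_length_eq_zero (Nat.le_zero.mp h)
    subst this; simp
  | succ n ih =>
    intro head h hn hl tail
    match head with
    | [] => simp
    | c :: rest =>
      simp only [List.length_cons] at h
      have hdropne : List.dropWhile paDD (c :: rest) ≠ [] := by
        intro he
        rw [List.dropWhile_eq_nil_iff] at he
        have hlast : (c :: rest).getLast? = some ((c :: rest).getLast (by simp)) :=
          List.getLast?_eq_some_getLast (by simp)
        have := hl _ hlast
        rw [he _ (List.getLast_mem _)] at this
        simp at this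
      by_cases hc : (c.isDigit || (c == '.' && (((rest ++ tail).head?.map Char.isDigit).getD false))) = true
      · -- run case: the run stays inside head
        have hpa := cond_paDD hc
        have htw : List.takeWhile paDD ((c :: rest) ++ tail) = List.takeWhile paDD (c :: rest) := by
          rw [List.takeWhile_append]
          rw [if_neg]
          intro hle
          have := List.takeWhile_append_dropWhile (p := paDD) (l := c :: rest)
          have h2 : (List.dropWhile paDD (c :: rest)).length = 0 := by
            have := congrArg List.length this
            simp only [List.length_append] at this
            omega
          exact hdropne (List.eq_nil_of_length_eq_zero h2)
        have hdw : List.dropWhile paDD ((c :: rest) ++ tail) = List.dropWhile paDD (c :: rest) ++ tail := by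
          rw [List.dropWhile_append, if_neg]
          simp [List.isEmpty_iff, hdropne]
        obtain ⟨d, ds, hds⟩ : ∃ d ds, List.dropWhile paDD (c :: rest) = d :: ds :=
          List.exists_cons_of_ne_nil hdropne
        have hdmem : d ∈ c :: rest := (List.dropWhile_suffix paDD).subset (by rw [hds]; simp)
        have hdnp : paDD d = false := by
          have := List.head?_dropWhile_not paDD (c :: rest)
          rw [hds] at this; simpa using this
        have hdne : d ≠ '%' := by intro he; subst he; exact hn hdmem
        have htw' : List.takeWhile paDD (c :: (rest ++ tail)) = List.takeWhile paDD (c :: rest) := htw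
        have hdw' : List.dropWhile paDD (c :: (rest ++ tail)) = List.dropWhile paDD (c :: rest) ++ tail := hdw
        have hp : ¬ (List.dropWhile paDD (c :: (rest ++ tail))).head? = some '%' := by
          rw [hdw', hds]; simp [hdne]
        show ptA (c :: (rest ++ tail)) = (c :: rest) ++ ptA tail
        rw [ptA_cons_run hc hp, htw', hdw', hds]
        -- apply IH to (d :: ds) ++ tail
        have hlen : (d :: ds).length ≤ n := by
          have := congrArg List.length (List.takeWhile_append_dropWhile (p := paDD) (l := c :: rest))
          rw [hds] at this
          simp only [List.length_append, List.length_cons] at this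
          have htne : (List.takeWhile paDD (c :: rest)).length ≠ 0 := by
            rw [List.takeWhile_cons_of_pos hpa]; simp
          simp only [List.length_cons]; omega
        have hsub : ∀ x ∈ d :: ds, x ∈ c :: rest := by
          intro x hx; rw [← hds] at hx; exact (List.dropWhile_suffix paDD).subset hx
        have hlast2 : ∀ x, (d :: ds).getLast? = some x → paDD x = false := by
          intro x hx
          obtain ⟨pre, hpre⟩ := List.dropWhile_suffix (l := c :: rest) paDD
          rw [hds] at hpre
          apply hl
          rw [← hpre, List.getLast?_append_of_ne_nil pre (by simp)]
          exact hx
        rw [ih _ hlen (fun hx => hn (hsub _ hx)) hlast2 tail]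
        rw [← List.append_assoc, ← hds, List.takeWhile_append_dropWhile]
      · rw [show (c :: rest) ++ tail = c :: (rest ++ tail) by simp, ptA_cons_lit hc]
        rcases List.eq_nil_or_concat rest with hre | ⟨r0, x, hrx⟩
        · subst hre
          simp only [List.nil_append]
          have : paDD c = false := hl c (by simp)
          -- c is the last char and fails paDD; rest = []: result c :: ptA tail
          simp
        · have hrne : rest ≠ [] := by rw [hrx]; simp
          rw [ih rest (by omega) (fun hx => hn (List.mem_cons_of_mem _ hx))
            (fun x hx => hl x (by simp [List.getLast?_cons, hx])) tail]
          simp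

-- a run of dots not forming a number: each dot and the '%' pass through
lemma ptA_dots (ds : List Char) (hds : ∀ c ∈ ds, c = '.') (rest : List Char) :
    ptA (ds ++ '%' :: rest) = ds ++ '%' :: ptA rest := by
  induction ds with
  | nil =>
    simp only [List.nil_append]
    rw [ptA_cons_lit (by simp)]
  | cons c ds ih =>
    have hc : c = '.' := hds c (by simp)
    subst hc
    have hcond : ¬ (('.'.isDigit || ('.' == '.' && (((ds ++ '%' :: rest).head?.map Char.isDigit).getD false)))) = true := by
      match ds with
      | [] => simp
      | d' :: ds' =>
        have : d' = '.' := hds d' (by simp)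
        subst this; simp
    rw [List.cons_append, ptA_cons_lit hcond, ih (fun x hx => hds x (by simp [hx]))]
    simp

-- a number run (leading dots, then a digit, then digits/dots) followed by '%'
lemma ptA_number (ds : List Char) (hds : ∀ c ∈ ds, c = '.') (d : Char) (hd : d.isDigit = true)
    (rs : List Char) (hrs : ∀ c ∈ rs, paDD c = true) (rest : List Char) :
    ptA (ds ++ d :: rs ++ '%' :: rest) =
      (if ds = [] then '(' :: ((d :: rs) ++ "/100)".toList)
       else ds.dropLast ++ '(' :: (('.' :: d :: rs) ++ "/100)".toList)) ++ ptA rest := by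
  have hall : ∀ c ∈ d :: rs, paDD c = true := by
    intro c hc; rcases List.mem_cons.mp hc with h | h
    · subst h; simp [paDD, hd]
    · exact hrs c h
  have htw : List.takeWhile paDD (d :: (rs ++ '%' :: rest)) = d :: rs := by
    show List.takeWhile paDD ((d :: rs) ++ '%' :: rest) = d :: rs
    rw [List.takeWhile_append, if_pos (by rw [List.takeWhile_eq_self_iff.mpr hall])]
    rw [List.takeWhile_cons_of_neg (by simp [paDD])]
    simp
  have hdw : List.dropWhile paDD (d :: (rs ++ '%' :: rest)) = '%' :: rest := by
    show List.dropWhile paDD ((d :: rs) ++ '%' :: rest) = '%' :: rest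
    rw [List.dropWhile_append,
      if_pos (by simp only [List.isEmpty_iff, List.dropWhile_eq_nil_iff]; exact hall)]
    rw [List.dropWhile_cons_of_neg (by simp [paDD])]
  induction ds with
  | nil =>
    simp only [List.nil_append, if_pos rfl]
    have hcnd : ((d.isDigit || (d == '.' && ((((rs ++ '%' :: rest)).head?.map Char.isDigit).getD false)))) = true := by
      simp [hd]
    rw [show (d :: rs ++ '%' :: rest : List Char) = d :: (rs ++ '%' :: rest) from rfl]
    rw [ptA_cons_wrap hcnd (by rw [hdw]; simp), htw, hdw]
    simp
  | cons c ds ih =>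
    have hc : c = '.' := hds c (by simp)
    subst hc
    match ds, hds with
    | [], _ =>
      have hcnd : (('.'.isDigit || ('.' == '.' && ((((d :: rs ++ '%' :: rest)).head?.map Char.isDigit).getD false)))) = true := by
        simp [hd]
      have htw2 : List.takeWhile paDD ('.' :: (d :: rs ++ '%' :: rest)) = '.' :: d :: rs := by
        rw [List.takeWhile_cons_of_pos (by simp [paDD])]
        rw [show (d :: rs ++ '%' :: rest : List Char) = d :: (rs ++ '%' :: rest) from rfl, htw]
      have hdw2 : List.dropWhile paDD ('.' :: (d :: rs ++ '%' :: rest)) = '%' :: rest := by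
        rw [List.dropWhile_cons_of_pos (by simp [paDD])]
        exact hdw
      show ptA ('.' :: (d :: rs ++ '%' :: rest)) =
        (if (['.'] : List Char) = [] then '(' :: (d :: rs ++ "/100)".toList)
         else ['.'].dropLast ++ '(' :: ('.' :: d :: rs ++ "/100)".toList)) ++ ptA rest
      rw [ptA_cons_wrap hcnd (by rw [hdw2]; simp), htw2, hdw2]
      simp
    | e :: ds', hds =>
      have he : e = '.' := hds e (by simp)
      subst he
      have hcnd : ¬ (('.'.isDigit || ('.' == '.' && (((((( '.' :: ds') ++ d :: rs ++ '%' :: rest)).head?.map Char.isDigit).getD false)))) = true) := by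
        simp
      show ptA ('.' :: (('.' :: ds') ++ d :: rs ++ '%' :: rest)) = _
      rw [ptA_cons_lit hcnd, ih (fun x hx => hds x (by simp [hx]))]
      simp

lemma ptA_passthrough (head : List Char) (hn : '%' ∉ head)
    (hl : ∀ x, head.getLast? = some x → paDD x = false) (tail : List Char) :
    ptA (head ++ tail) = head ++ ptA tail :=
  ptA_passthrough_aux head.length head le_rfl hn hl tail

-- one '%'-free fragment followed by '%': A's loop produces exactly Source B's piece
lemma ptA_seg (seg rest : List Char) (hn : '%' ∉ seg) :
    ptA (seg ++ '%' :: rest) = pbPiece seg ++ ptA rest := by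
  have hcls : pbCls = paDD := funext pbCls_eq_paDD
  rw [pbPiece, hcls]
  dsimp only
  set head := (List.dropWhile paDD seg.reverse).reverse with hhead
  set run0 := (List.takeWhile paDD seg.reverse).reverse with hrun0
  have hseg : head ++ run0 = seg := by
    rw [hhead, hrun0, ← List.reverse_append, List.takeWhile_append_dropWhile, List.reverse_reverse]
  have hdrop : seg.drop head.length = run0 := by rw [← hseg, List.drop_left]
  have hrunall : ∀ c ∈ run0, paDD c = true := by
    intro c hc
    exact List.mem_takeWhile_imp (List.mem_reverse.mp hc)
  have hlast : ∀ x, head.getLast? = some x → paDD x = false := by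
    intro x hx
    rw [hhead, List.getLast?_reverse] at hx
    have := List.head?_dropWhile_not paDD seg.reverse
    rw [hx] at this
    simpa using this
  have hhn : '%' ∉ head := by
    intro hx
    apply hn
    rw [← hseg]
    exact List.mem_append.mpr (Or.inl hx)
  have hlhs : ptA (seg ++ '%' :: rest) = head ++ ptA (run0 ++ '%' :: rest) := by
    conv_lhs => rw [← hseg, List.append_assoc]
    exact ptA_passthrough head hhn hlast _
  rw [hlhs, hdrop]
  rcases hrem : List.dropWhile (· == '.') run0 with _ | ⟨d, rs⟩
  · -- run0 is all dots (possibly empty): the '%' stays literal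
    have hdots : ∀ c ∈ run0, c = '.' := by
      rw [List.dropWhile_eq_nil_iff] at hrem
      intro c hc; simpa using hrem c hc
    rw [ptA_dots run0 hdots rest]
    simp only [List.length_nil, Nat.sub_zero]
    rw [← hseg]
    simp
  · -- run0 contains a digit
    have hsplit : List.takeWhile (· == '.') run0 ++ d :: rs = run0 := by
      rw [← hrem, List.takeWhile_append_dropWhile]
    set ds := List.takeWhile (· == '.') run0 with hds
    have hdsall : ∀ c ∈ ds, c = '.' := fun c hc => by simpa using List.mem_takeWhile_imp hc
    have hdmem : d ∈ run0 := by rw [← hsplit]; simp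
    have hdnd : ¬ d = '.' := by
      have := List.head?_dropWhile_not (· == '.') run0
      rw [hrem] at this; simpa using this
    have hddig : d.isDigit = true := by
      have := hrunall d hdmem
      simp only [paDD, Bool.or_eq_true] at this
      rcases this with h | h
      · exact h
      · exact absurd (by simpa using h) hdnd
    have hrsall : ∀ c ∈ rs, paDD c = true := by
      intro c hc
      exact hrunall c (by rw [← hsplit]; simp [hc])
    have hlen : run0.length = ds.length + (d :: rs).length := by
      rw [← hsplit, List.length_append]
    have hne : ¬ (run0.length - (d :: rs).length = run0.length) := by
      simp only [List.length_cons] at hlen ⊢; omega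
    rw [if_neg hne]
    have hdots_eq : run0.length - (d :: rs).length = ds.length := by omega
    rw [hdots_eq]
    have hlhs2 : ptA (run0 ++ '%' :: rest) = ptA (ds ++ d :: rs ++ '%' :: rest) := by
      rw [← hsplit]
    rw [hlhs2, ptA_number ds hdsall d hddig rs hrsall rest]
    rcases hdsc : ds with _ | ⟨e, ds2⟩
    · -- no leading dots: wrap the whole run
      rw [hdsc] at hsplit
      simp only [List.nil_append] at hsplit
      have hcut1 : seg.take head.length = head := by rw [← hseg]; exact List.take_left' rfl
      simp [hcut1, hdrop, ← hsplit]
    · -- k ≥ 1 leading dots: the first k-1 stay outside, one dot joins the number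
      have hdsne : ds ≠ [] := by rw [hdsc]; simp
      have hgl : ds.getLast hdsne = '.' := hdsall _ (List.getLast_mem _)
      have hds_split : ds.dropLast ++ ['.'] = ds := by
        conv_rhs => rw [← List.dropLast_append_getLast hdsne]
        rw [hgl]
      have hseg2 : (head ++ ds.dropLast) ++ ('.' :: d :: rs) = seg := by
        rw [← hseg, ← hsplit, ← hds_split]; simp
      have hcutlen : head.length + (ds.length - 1) = (head ++ ds.dropLast).length := by
        have h2 : ds.dropLast.length = ds.length - 1 := by simp
        simp [h2]
      rw [← hdsc, if_neg (by rw [hdsc]; simp), if_pos (by rw [hdsc]; simp)]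
      rw [hcutlen]
      have hcut1 : seg.take (head ++ ds.dropLast).length = head ++ ds.dropLast := by
        rw [← hseg2]; exact List.take_left' rfl
      have hcut2 : seg.drop (head ++ ds.dropLast).length = '.' :: d :: rs := by
        rw [← hseg2]; exact List.drop_left' rfl
      rw [hcut1, hcut2]
      simp

-- reference recursion for str.split('%')
def mySplit (pre : List Char) (l : List Char) : List (List Char) :=
  match l with
  | [] => [pre]
  | c :: r => if c = '%' then pre :: mySplit [] r else mySplit (pre ++ [c]) r

lemma go_eq_mySplit : ∀ (l : List Char) (fuel : Nat) (cur : List Char) (acc : List (List Char)),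
    l.length < fuel →
    PySem.Chars.splitOn.go ['%'] fuel l cur acc = acc.reverse ++ mySplit cur.reverse l := by
  intro l
  induction l with
  | nil =>
    intro fuel cur acc h
    match fuel with
    | n + 1 => simp [PySem.Chars.splitOn.go, mySplit]
  | cons c r ih =>
    intro fuel cur acc h
    match fuel with
    | n + 1 =>
      simp only [List.length_cons] at h
      by_cases hc : c = '%'
      · subst hc
        rw [show PySem.Chars.splitOn.go ['%'] (n+1) ('%' :: r) cur acc
            = PySem.Chars.splitOn.go ['%'] n r [] (cur.reverse :: acc) by
          rw [PySem.Chars.splitOn.go]; simp]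
        rw [ih n [] (cur.reverse :: acc) (by simpa using h)]
        simp [mySplit]
      · rw [show PySem.Chars.splitOn.go ['%'] (n+1) (c :: r) cur acc
            = PySem.Chars.splitOn.go ['%'] n r (c :: cur) acc by
          rw [PySem.Chars.splitOn.go]
          simp [List.isPrefixOf, Ne.symm hc]]
        rw [ih n (c :: cur) acc (by omega)]
        simp [mySplit, hc]

lemma splitOn_eq_mySplit (l : List Char) :
    PySem.Chars.splitOn l ['%'] = mySplit [] l := by
  rw [PySem.Chars.splitOn, go_eq_mySplit l (l.length + 1) [] [] (by omega)]
  simp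

lemma mySplit_no_pct (seg : List Char) (h : '%' ∉ seg) : ∀ pre, mySplit pre seg = [pre ++ seg] := by
  induction seg with
  | nil => intro pre; simp [mySplit]
  | cons c r ih =>
    intro pre
    have hc : ¬ c = '%' := fun he => h (by simp [he])
    rw [mySplit, if_neg hc, ih (fun hx => h (by simp [hx])) (pre ++ [c])]
    simp

lemma mySplit_seg (seg : List Char) (h : '%' ∉ seg) :
    ∀ pre rest, mySplit pre (seg ++ '%' :: rest) = (pre ++ seg) :: mySplit [] rest := by
  induction seg with
  | nil => intro pre rest; simp [mySplit]
  | cons c r ih =>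
    intro pre rest
    have hc : ¬ c = '%' := fun he => h (by simp [he])
    rw [List.cons_append, mySplit, if_neg hc, ih (fun hx => h (by simp [hx])) (pre ++ [c]) rest]
    simp

lemma mySplit_ne_nil (l : List Char) : ∀ pre, mySplit pre l ≠ [] := by
  induction l with
  | nil => intro pre; simp [mySplit]
  | cons c r ih =>
    intro pre
    rw [mySplit]
    split_ifs
    · simp
    · exact ih (pre ++ [c])

lemma join_nil_eq_flatten (l : List (List Char)) : PySem.Chars.join [] l = l.flatten := by
  induction l with
  | nil => rw [PySem.Chars.join_nil]; rfl
  | cons x xs ih =>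
    cases xs with
    | nil => rw [PySem.Chars.join_singleton]; simp
    | cons y ys =>
      rw [PySem.Chars.join_cons_cons, ih]
      simp

lemma getLastD_irrel (l : List (List Char)) (h : l ≠ []) (d1 d2 : List Char) :
    l.getLastD d1 = l.getLastD d2 := by
  rw [List.getLastD_eq_getLast?, List.getLastD_eq_getLast?, List.getLast?_eq_some_getLast h]
  rfl

def bAltList (cs : List Char) : List Char :=
  PySem.Chars.join []
    ((PySem.Chars.splitOn cs ['%']).dropLast.map pbPiece ++ [(PySem.Chars.splitOn cs ['%']).getLastD []])

lemma main_aux : ∀ (n : Nat) (cs : List Char), cs.length ≤ n → ptA cs = bAltList cs := by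
  intro n
  induction n with
  | zero =>
    intro cs h
    have : cs = [] := List.eq_nil_of_length_eq_zero (Nat.le_zero.mp h)
    subst this
    rw [ptA_nil]
    rfl
  | succ n ih =>
    intro cs h
    by_cases hm : '%' ∈ cs
    · have hd : List.dropWhile (fun c => !(c == '%')) cs ≠ [] := by
        intro hnil
        rw [List.dropWhile_eq_nil_iff] at hnil
        have := hnil '%' hm
        simp at this
      obtain ⟨e, tail, he⟩ := List.exists_cons_of_ne_nil hd
      have he' : e = '%' := by
        have := List.head?_dropWhile_not (fun c => !(c == '%')) cs
        rw [he] at this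
        simpa using this
      subst he'
      have hcs : cs = List.takeWhile (fun c => !(c == '%')) cs ++ '%' :: tail := by
        have h2 := List.takeWhile_append_dropWhile (p := fun c => !(c == '%')) (l := cs)
        rw [he] at h2
        exact h2.symm
      set seg := List.takeWhile (fun c => !(c == '%')) cs with hsegdef
      have hnseg : '%' ∉ seg := by
        intro hx
        have := List.mem_takeWhile_imp hx
        simp at this
      have htail : tail.length ≤ n := by
        have := congrArg List.length hcs
        simp only [List.length_append, List.length_cons] at this
        omega
      have hparts : PySem.Chars.splitOn cs ['%'] = seg :: mySplit [] tail := by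
        rw [splitOn_eq_mySplit]
        conv_lhs => rw [hcs]
        rw [mySplit_seg seg hnseg [] tail]
        simp
      have hpn := mySplit_ne_nil tail []
      calc ptA cs = ptA (seg ++ '%' :: tail) := by rw [← hcs]
        _ = pbPiece seg ++ ptA tail := ptA_seg seg tail hnseg
        _ = pbPiece seg ++ bAltList tail := by rw [ih tail htail]
        _ = bAltList cs := by
            rw [bAltList, bAltList, hparts, splitOn_eq_mySplit]
            rw [List.dropLast_cons_of_ne_nil hpn]
            rw [join_nil_eq_flatten, join_nil_eq_flatten]
            simp only [List.map_cons, List.cons_append, List.flatten_cons]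
            rw [List.getLastD_cons, getLastD_irrel (mySplit [] tail) hpn seg []]
    · have hparts : PySem.Chars.splitOn cs ['%'] = [cs] := by
        rw [splitOn_eq_mySplit, mySplit_no_pct cs hm []]
        rfl
      rw [ptA_no_pct_aux cs.length cs le_rfl hm, bAltList, hparts]
      simp

-- ===== VERDICT (by name: the statement is the Claim_ definition above) =====
theorem percent_transform_spec : Claim_equal_percent_transform := by
  intro expr _
  unfold Spec_percent_transform percent_transform percent_transform_alt
  exact congrArg String.ofList (main_aux expr.toList.length expr.toList le_rfl)
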